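-- pv_equiv track=rewrite | github.com/ChitturiSaiSuman/email-notifier-python | src/run.py | apply_preferences
-- ===== SOURCE A (Python) =====
-- def apply_preferences(unread_emails: list, preferences: dict):
--     watch_tags = preferences.get("watch", [])
--     ignore_tags = preferences.get("ignore", [])
--
--     unread_emails = filter(
--         lambda email: not any(
--             tag.lower() in email["subject"].lower()
--             or tag.lower() in email["from"].lower()
--             for tag in ignore_tags
--         ),
--         unread_emails,
--     )
--
--     if not unread_emails:
--         return []
--
--     unread_emails = sorted(
--         unread_emails,
--         key=lambda email: sum(
--             tag.lower() in email["subject"].lower()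
--             or tag.lower() in email["from"].lower()
--             for tag in watch_tags
--         ),
--         reverse=True,
--     )
--
--     return unread_emails
-- ===== SOURCE B (Python) =====
-- def apply_preferences(unread_emails: list, preferences: dict):
--     watch = [t.lower() for t in preferences.get("watch", [])]
--     ignore = [t.lower() for t in preferences.get("ignore", [])]
--
--     if not watch and not ignore:
--         return list(unread_emails)
--
--     buckets = [[] for _ in range(len(watch) + 1)]
--     for email in unread_emails:
--         subj = email["subject"].lower()
--         frm = email["from"].lower()
--         if any(t in subj or t in frm for t in ignore):
--             continue
--         score = sum(1 for t in watch if t in subj or t in frm)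
--         buckets[score].append(email)
--
--     result = []
--     for bucket in reversed(buckets):
--         result.extend(bucket)
--     return result
-- ===== Notes on version B (the rewrite author's own statement) =====
-- stated objective: alternative
-- what changed: Replaces filter-then-stable-reverse-sort with a single pass that skips ignored emails and buckets survivors by watch-tag count, then concatenates the buckets from highest score down (a counting sort that preserves input order within each score).
-- outside the precondition, e.g. on apply_preferences([{'subject': 'spam offer'}], {'ignore': ['spam']}): A returns [], B raises KeyError
import Mathlib
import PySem

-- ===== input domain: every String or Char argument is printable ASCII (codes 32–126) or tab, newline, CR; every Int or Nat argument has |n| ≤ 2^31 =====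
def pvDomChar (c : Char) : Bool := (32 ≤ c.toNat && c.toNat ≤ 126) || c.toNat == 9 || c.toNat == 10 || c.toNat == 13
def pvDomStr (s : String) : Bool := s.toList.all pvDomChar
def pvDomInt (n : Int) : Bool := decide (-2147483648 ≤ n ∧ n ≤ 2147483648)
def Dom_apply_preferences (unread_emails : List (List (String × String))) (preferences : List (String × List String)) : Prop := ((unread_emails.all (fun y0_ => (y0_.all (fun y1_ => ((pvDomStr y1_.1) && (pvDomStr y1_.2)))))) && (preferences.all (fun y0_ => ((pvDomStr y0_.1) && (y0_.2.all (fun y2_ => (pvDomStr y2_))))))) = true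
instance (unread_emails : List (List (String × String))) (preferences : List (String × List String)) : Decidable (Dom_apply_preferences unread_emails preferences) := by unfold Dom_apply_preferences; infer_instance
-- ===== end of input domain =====

-- B replaces filter-then-stable-reverse-sort by one pass bucketing survivors by watch-tag count
-- and concatenating buckets from the highest score down (objective: alternative algorithm).

-- ===== PORT A =====
-- email["subject"] / email["from"]: Python raises KeyError when the key is absent; those runs are
-- excluded by Pre_, so the total getD "" stand-in is exact on every admitted input.
def pvSubject (email : List (String × String)) : String :=
  PySem.Dict.getD (PySem.Dict.mk email) "subject" ""

def pvFrom (email : List (String × String)) : String :=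
  PySem.Dict.getD (PySem.Dict.mk email) "from" ""

-- tag.lower() in email["subject"].lower() or tag.lower() in email["from"].lower()
def pvHit (tag : String) (email : List (String × String)) : Bool :=
  PySem.Str.isIn (PySem.Str.lower tag) (PySem.Str.lower (pvSubject email)) ||
  PySem.Str.isIn (PySem.Str.lower tag) (PySem.Str.lower (pvFrom email))

def apply_preferences (unread_emails : List (List (String × String))) (preferences : List (String × List String)) : List (List (String × String)) :=
  let watch_tags := PySem.Dict.getD (PySem.Dict.mk preferences) "watch" []
  let ignore_tags := PySem.Dict.getD (PySem.Dict.mk preferences) "ignore" []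
  let filtered := unread_emails.filter (fun email => ! ignore_tags.any (fun tag => pvHit tag email))
  -- 'if not unread_emails: return []' never fires in Python: a filter object is always truthy
  -- sum(bool for …) ported as a foldl accumulating 1 per true test (sum of Trues is non-negative)
  PySem.List.sorted filtered
    (fun email => watch_tags.foldl (fun s tag => s + (if pvHit tag email then 1 else 0)) (0 : Nat))
    true

-- ===== PORT B =====
def apply_preferences_alt (unread_emails : List (List (String × String))) (preferences : List (String × List String)) : List (List (String × String)) :=
  let watch := (PySem.Dict.getD (PySem.Dict.mk preferences) "watch" []).map PySem.Str.lower
  let ignore := (PySem.Dict.getD (PySem.Dict.mk preferences) "ignore" []).map PySem.Str.lower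
  if watch = [] ∧ ignore = [] then unread_emails
  else
    let buckets := unread_emails.foldl (fun bs email =>
      let subj := PySem.Str.lower (pvSubject email)
      let frm := PySem.Str.lower (pvFrom email)
      if ignore.any (fun t => PySem.Str.isIn t subj || PySem.Str.isIn t frm) then bs
      else bs.modify
        (watch.countP (fun t => PySem.Str.isIn t subj || PySem.Str.isIn t frm))
        (fun b => b ++ [email]))
      (List.replicate (watch.length + 1) ([] : List (List (String × String))))
    buckets.reverse.foldl (fun r b => r ++ b) []

-- ===== PRECONDITION & SPEC =====
-- A raises KeyError on an email lacking "subject" or "from" whenever it evaluates a tag test, i.e.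
-- whenever some tag list is non-empty; Pre_ excludes those inputs.  This is slightly wider than A's
-- exact raising set: Python's short-circuit lets A return when an email lacking "from" has its
-- subject matched by the first ignore tag — excluded too (cited in claim.json; B raises there).
def Pre_apply_preferences (unread_emails : List (List (String × String))) (preferences : List (String × List String)) : Prop :=
  (PySem.Dict.getD (PySem.Dict.mk preferences) "watch" [] ≠ [] ∨
   PySem.Dict.getD (PySem.Dict.mk preferences) "ignore" [] ≠ []) →
  ∀ email ∈ unread_emails,
    PySem.Dict.contains (PySem.Dict.mk email) "subject" = true ∧
    PySem.Dict.contains (PySem.Dict.mk email) "from" = true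

instance (unread_emails : List (List (String × String))) (preferences : List (String × List String)) : Decidable (Pre_apply_preferences unread_emails preferences) := by unfold Pre_apply_preferences; infer_instance

def pvWitness_apply_preferences : (List (List (String × String))) × (List (String × List String)) :=
  ([[("subject", "Big Sale"), ("from", "amy")], [("subject", "spam offer"), ("from", "bob")]],
   [("watch", ["sale"]), ("ignore", ["spam"])])

def Spec_apply_preferences (unread_emails : List (List (String × String))) (preferences : List (String × List String)) (out : List (List (String × String))) : Prop := out = apply_preferences_alt unread_emails preferences
instance (unread_emails : List (List (String × String))) (preferences : List (String × List String)) (out : List (List (String × String))) : Decidable (Spec_apply_preferences unread_emails preferences out) := by unfold Spec_apply_preferences; infer_instance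

-- ===== CLAIM (what is proved, stated in full; the proofs are below) =====
def Claim_equal_apply_preferences : Prop := ∀ (unread_emails : List (List (String × String))) (preferences : List (String × List String)), Dom_apply_preferences unread_emails preferences → Pre_apply_preferences unread_emails preferences → Spec_apply_preferences unread_emails preferences (apply_preferences unread_emails preferences)

-- ===== LEMMAS AND PROOFS =====

-- insertBy inserts x after every element it is not 'before' and in front of the rest
lemma pv_insertBy_split {α : Type} (bef : α → α → Bool) (x : α) (l₁ l₂ : List α)
    (h₁ : ∀ y ∈ l₁, bef x y = false) (h₂ : ∀ y ∈ l₂, bef x y = true) :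
    PySem.List.insertBy bef x (l₁ ++ l₂) = l₁ ++ x :: l₂ := by
  induction l₁ with
  | nil =>
    cases l₂ with
    | nil => simp [PySem.List.insertBy]
    | cons y ys => simp [PySem.List.insertBy, h₂ y (by simp)]
  | cons a l₁ ih =>
    have ha := h₁ a (by simp)
    simp [PySem.List.insertBy, ha]
    exact ih (fun y hy => h₁ y (by simp [hy]))

-- Python's stable reverse sort by a key covered by a strictly decreasing value list vs
-- is the concatenation, over vs in order, of the in-order buckets of equal-key elements.
lemma pv_sorted_rev_buckets {α : Type} (xs : List α) (key : α → Nat) (vs : List Nat)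
    (hdec : vs.Pairwise (fun a b => b < a)) (hcov : ∀ x ∈ xs, key x ∈ vs) :
    PySem.List.sorted xs key true = vs.flatMap (fun v => xs.filter (fun x => key x == v)) := by
  induction xs using List.reverseRecOn with
  | nil => simp [PySem.List.sorted]
  | append_singleton xs x ih =>
    have hx : key x ∈ vs := hcov x (by simp)
    obtain ⟨vs₁, vs₂, hvs⟩ := List.append_of_mem hx
    have hdec' := hvs ▸ hdec
    rw [List.pairwise_append] at hdec'
    obtain ⟨-, hc, hbig⟩ := hdec'
    rw [List.pairwise_cons] at hc
    have hbig' : ∀ v ∈ vs₁, key x < v := fun v hv => hbig v hv (key x) (by simp)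
    have hsmall : ∀ v ∈ vs₂, v < key x := fun v hv => hc.1 v hv
    have ihe := ih (fun y hy => hcov y (by simp [hy]))
    rw [PySem.List.sorted_rev_eq_foldl_insertBy, List.foldl_append, List.foldl_cons,
        List.foldl_nil, ← PySem.List.sorted_rev_eq_foldl_insertBy, ihe, hvs]
    -- decompose the old flatMap around the key-x bucket
    have hsplit : (vs₁ ++ key x :: vs₂).flatMap (fun v => xs.filter (fun y => key y == v))
        = (vs₁.flatMap (fun v => xs.filter (fun y => key y == v))
            ++ xs.filter (fun y => key y == key x))
          ++ vs₂.flatMap (fun v => xs.filter (fun y => key y == v)) := by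
      simp [List.flatMap_append]
    rw [hsplit, pv_insertBy_split]
    · -- list equality with the new flatMap
      have e₁ : vs₁.flatMap (fun v => (xs ++ [x]).filter (fun y => key y == v))
          = vs₁.flatMap (fun v => xs.filter (fun y => key y == v)) := by
        rw [List.flatMap_def, List.flatMap_def]
        congr 1
        apply List.map_congr_left
        intro v hv
        have : (key x == v) = false := by
          simp only [beq_eq_false_iff_ne]
          exact Nat.ne_of_lt (hbig' v hv)
        simp [List.filter_append, this]
      have e₂ : vs₂.flatMap (fun v => (xs ++ [x]).filter (fun y => key y == v))
          = vs₂.flatMap (fun v => xs.filter (fun y => key y == v)) := by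
        rw [List.flatMap_def, List.flatMap_def]
        congr 1
        apply List.map_congr_left
        intro v hv
        have : (key x == v) = false := by
          simp only [beq_eq_false_iff_ne]
          exact Nat.ne_of_gt (hsmall v hv)
        simp [List.filter_append, this]
      have e₃ : (xs ++ [x]).filter (fun y => key y == key x)
          = xs.filter (fun y => key y == key x) ++ [x] := by
        simp [List.filter_append]
      rw [List.flatMap_append, List.flatMap_cons, e₁, e₂, e₃]
      simp [List.append_assoc]
    · -- elements before the insertion point: key ≥ key x
      intro y hy
      simp only [List.mem_append, List.mem_flatMap, List.mem_filter] at hy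
      rcases hy with ⟨v, hv, -, hk⟩ | ⟨-, hk⟩
      · have : key y = v := by simpa using hk
        simp [this]
        exact Nat.le_of_lt (hbig' v hv)
      · have : key y = key x := by simpa using hk
        simp [this]
    · -- elements after the insertion point: key < key x
      intro y hy
      simp only [List.mem_flatMap, List.mem_filter] at hy
      obtain ⟨v, hv, -, hk⟩ := hy
      have : key y = v := by simpa using hk
      simp [this]
      exact hsmall v hv

-- bucket construction: each slot of the fold result is the in-order bucket of its score
lemma pv_foldl_modify_getElem? {α : Type} (key : α → Nat) (xs : List α)
    (init : List (List α)) (h : ∀ x ∈ xs, key x < init.length) (k : Nat) :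
    (xs.foldl (fun bs x => bs.modify (key x) (fun b => b ++ [x])) init)[k]?
      = (init[k]?).map (fun b => b ++ xs.filter (fun x => key x == k)) := by
  induction xs generalizing init with
  | nil =>
    cases hk : init[k]? <;> simp [hk]
  | cons x xs ih =>
    rw [List.foldl_cons]
    rw [ih (init.modify (key x) (fun b => b ++ [x])) (fun y hy => by
      rw [List.length_modify]; exact h y (by simp [hy]))]
    rw [List.getElem?_modify]
    by_cases hkx : key x = k
    · cases hk : init[k]? with
      | none => simp [hkx]
      | some b => simp [hkx, List.append_assoc]
    · cases hk : init[k]? with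
      | none => simp [hkx]
      | some b =>
        have : (key x == k) = false := by simpa using hkx
        simp [hkx, this]

lemma pv_buckets_eq {α : Type} (key : α → Nat) (xs : List α) (n : Nat)
    (h : ∀ x ∈ xs, key x ≤ n) :
    xs.foldl (fun bs x => bs.modify (key x) (fun b => b ++ [x]))
      (List.replicate (n + 1) ([] : List α))
      = (List.range (n + 1)).map (fun v => xs.filter (fun x => key x == v)) := by
  apply List.ext_getElem?
  intro k
  rw [pv_foldl_modify_getElem? key xs _
    (fun x hx => by simpa using Nat.lt_succ_of_le (h x hx))]
  by_cases hk : k < n + 1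
  · simp [hk]
  · simp [hk]

lemma pv_foldl_append_eq_flatten {α : Type} (l : List (List α)) (a : List α) :
    l.foldl (fun r b => r ++ b) a = a ++ l.flatten := by
  induction l generalizing a with
  | nil => simp
  | cons b l ih => simp [ih, List.append_assoc]

-- a left fold of 'add 1 if p' counts the satisfying elements
lemma pv_foldl_count {α : Type} (p : α → Bool) (xs : List α) (a : Nat) :
    xs.foldl (fun s t => s + (if p t then 1 else 0)) a = a + xs.countP p := by
  induction xs generalizing a with
  | nil => simp
  | cons x xs ih =>
    by_cases hx : p x
    · simp [hx, ih]; omega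
    · simp [hx, ih]

lemma pv_foldl_skip {α β : Type} (p : α → Bool) (f : β → α → β) (xs : List α) (init : β) :
    xs.foldl (fun b x => if p x then b else f b x) init
      = (xs.filter (fun x => ! p x)).foldl f init := by
  induction xs generalizing init with
  | nil => simp
  | cons x xs ih => by_cases hx : p x <;> simp [hx, ih]

-- the whole equivalence, stated over the two extracted tag lists
lemma pv_main (ue : List (List (String × String))) (wt ig : List String) :
    PySem.List.sorted (ue.filter (fun e => ! ig.any (fun t => pvHit t e)))
      (fun e => wt.foldl (fun s t => s + (if pvHit t e then 1 else 0)) (0 : Nat)) true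
    = (if wt.map PySem.Str.lower = [] ∧ ig.map PySem.Str.lower = [] then ue
       else
        ((ue.foldl (fun bs email =>
            if (ig.map PySem.Str.lower).any (fun t =>
                 PySem.Str.isIn t (PySem.Str.lower (pvSubject email)) ||
                 PySem.Str.isIn t (PySem.Str.lower (pvFrom email))) then bs
            else bs.modify
              ((wt.map PySem.Str.lower).countP (fun t =>
                 PySem.Str.isIn t (PySem.Str.lower (pvSubject email)) ||
                 PySem.Str.isIn t (PySem.Str.lower (pvFrom email))))
              (fun b => b ++ [email]))
          (List.replicate ((wt.map PySem.Str.lower).length + 1)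
            ([] : List (List (String × String))))).reverse.foldl (fun r b => r ++ b) [])) := by
  by_cases hempty : wt.map PySem.Str.lower = [] ∧ ig.map PySem.Str.lower = []
  · rw [if_pos hempty]
    have hw0 : wt = [] := List.map_eq_nil_iff.mp hempty.1
    have hi0 : ig = [] := List.map_eq_nil_iff.mp hempty.2
    subst hw0 hi0
    simp only [List.any_nil, Bool.not_false, List.filter_true, List.foldl_nil]
    exact PySem.List.sorted_rev_eq_self_of_pairwise _ _
      (List.pairwise_of_forall (fun _ _ => le_refl 0))
  · rw [if_neg hempty]
    have hk : (fun e => wt.foldl (fun s t => s + (if pvHit t e then 1 else 0)) (0 : Nat))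
        = (fun e => wt.countP (fun t => pvHit t e)) := by
      funext e; rw [pv_foldl_count]; omega
    rw [hk]
    have hfun : (fun (bs : List (List (List (String × String)))) email =>
          if (ig.map PySem.Str.lower).any (fun t =>
               PySem.Str.isIn t (PySem.Str.lower (pvSubject email)) ||
               PySem.Str.isIn t (PySem.Str.lower (pvFrom email))) then bs
          else bs.modify
            ((wt.map PySem.Str.lower).countP (fun t =>
               PySem.Str.isIn t (PySem.Str.lower (pvSubject email)) ||
               PySem.Str.isIn t (PySem.Str.lower (pvFrom email))))
            (fun b => b ++ [email]))
        = (fun bs email =>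
          if ig.any (fun t => pvHit t email) then bs
          else bs.modify (wt.countP (fun t => pvHit t email)) (fun b => b ++ [email])) := by
      funext bs email
      rw [List.any_map, List.countP_map]
      rfl
    rw [hfun, List.length_map]
    rw [show (ue.foldl (fun bs email =>
          if ig.any (fun t => pvHit t email) then bs
          else bs.modify (wt.countP (fun t => pvHit t email)) (fun b => b ++ [email]))
        (List.replicate (wt.length + 1) ([] : List (List (String × String)))))
        = ((ue.filter (fun e => ! ig.any (fun t => pvHit t e))).foldl (fun bs email =>
            bs.modify (wt.countP (fun t => pvHit t email)) (fun b => b ++ [email]))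
          (List.replicate (wt.length + 1) ([] : List (List (String × String)))))
      from pv_foldl_skip _ _ _ _]
    rw [pv_buckets_eq (fun e => wt.countP (fun t => pvHit t e)) _ wt.length
         (fun x _ => List.countP_le_length)]
    rw [pv_foldl_append_eq_flatten, List.nil_append, ← List.map_reverse, ← List.flatMap_def]
    exact pv_sorted_rev_buckets _ _ _
      (List.pairwise_reverse.mpr List.pairwise_lt_range)
      (fun x _ => by
        simp only [List.mem_reverse, List.mem_range]
        exact Nat.lt_succ_of_le List.countP_le_length)

-- ===== VERDICT (by name: the statement is the Claim_ definition above) =====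
theorem apply_preferences_spec : Claim_equal_apply_preferences := by
  intro unread_emails preferences _ _
  unfold Spec_apply_preferences apply_preferences apply_preferences_alt
  exact pv_main unread_emails
    (PySem.Dict.getD (PySem.Dict.mk preferences) "watch" [])
    (PySem.Dict.getD (PySem.Dict.mk preferences) "ignore" [])
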